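-- pv_equiv track=rewrite | github.com/Hashim-K/TI3115TU | project/General.py | EmptySlots
-- ===== SOURCE A (Python) =====
-- def EmptySlots(schedule_array):
--     number_of_slots = len(schedule_array[0])
--     free_blocks = []
--     free_block = []
--     # This bit cycles through every slot in the schedule.
--     for day in range(len(schedule_array)):
--         for slot in range(len(schedule_array[day])):
--             # This bit checks if a slot is empty.
--             if schedule_array[day][slot] == -1:
--                 free_block.append([day, slot])
--             else:
--                 # This bit checks if there are any slots appended to free_block or if there are any slots appended to
--                 # free_block and if the slot is the last slot of the day. If True, the slot is appended to free_block,
--                 # free_block is appended to free_blocks and free_block is set to an empty list.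
--                 if len(free_block) > 0 or (len(free_block) > 0 and slot == number_of_slots - 1):
--                     free_block.append([day, slot])
--                     free_blocks.append(free_block)
--                     free_block = []
--     # This bit removes the slots in between the first and the last slot for each block of free slots so only the start
--     # slot and the end slot remain.
--     for free_block in free_blocks:
--         while len(free_block) > 2:
--             free_block.pop(1)
--     return free_blocks
-- ===== SOURCE B (Python) =====
-- def EmptySlots(schedule_array):
--     # Edge detection: track only the start of the current empty run; emit
--     # [start, closing_slot] when a non-empty slot ends a run. A run still
--     # open at the very end is discarded, matching the task's behaviour.
--     blocks = []
--     start = None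
--     for day, row in enumerate(schedule_array):
--         for slot, value in enumerate(row):
--             if value == -1:
--                 if start is None:
--                     start = [day, slot]
--             else:
--                 if start is not None:
--                     blocks.append([start, [day, slot]])
--                     start = None
--     return blocks
-- ===== Notes on version B (the rewrite author's own statement) =====
-- stated objective: simpler
-- what changed: B detects run edges with a single current-start variable and emits [start,end] pairs directly, instead of A's accumulating every empty slot of a run into a list and then popping interior elements in a quadratic post-pass; B also drops the index-based loops for direct enumeration.
-- outside the precondition, e.g. on EmptySlots([]): A raises IndexError, B returns []
import Mathlib
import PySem

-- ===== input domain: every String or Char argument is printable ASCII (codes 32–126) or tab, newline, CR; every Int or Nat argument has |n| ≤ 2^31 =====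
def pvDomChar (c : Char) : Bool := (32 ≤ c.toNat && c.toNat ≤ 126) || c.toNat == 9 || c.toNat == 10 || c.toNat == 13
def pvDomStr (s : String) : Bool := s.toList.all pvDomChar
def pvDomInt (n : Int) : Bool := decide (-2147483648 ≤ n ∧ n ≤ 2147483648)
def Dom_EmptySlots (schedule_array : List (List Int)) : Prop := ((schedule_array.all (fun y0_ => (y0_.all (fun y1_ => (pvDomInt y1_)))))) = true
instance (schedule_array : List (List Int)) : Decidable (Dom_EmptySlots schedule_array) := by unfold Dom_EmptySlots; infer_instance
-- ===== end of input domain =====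

-- B replaces A's "accumulate every empty slot then pop the interior" strategy by
-- direct edge detection keeping only the current run's start; same return value.

-- ===== PORT A =====
-- the final 'while len(free_block) > 2: free_block.pop(1)' loop of A
def shrinkA : List (List Int) → List (List Int)
  | x :: _ :: z :: rest => shrinkA (x :: z :: rest)
  | b => b
termination_by b => b.length
decreasing_by simp

-- number_of_slots (= len(schedule_array[0])) is inlined; the loops are folds over ranges with pyGetD indexing, as in the Python
def EmptySlots (schedule_array : List (List Int)) : List (List (List Int)) :=
  ((PySem.List.pyRange 0 (schedule_array.length : Int) 1).foldl
      (fun (st : List (List (List Int)) × List (List Int)) day =>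
        (PySem.List.pyRange 0 ((PySem.List.pyGetD schedule_array day []).length : Int) 1).foldl
          (fun st slot =>
            if PySem.List.pyGetD (PySem.List.pyGetD schedule_array day []) slot 0 = -1 then
              (st.1, st.2 ++ [[day, slot]])
            else
              if st.2.length > 0 ∨ (st.2.length > 0 ∧ slot = ((PySem.List.pyGetD schedule_array 0 []).length : Int) - 1) then
                (st.1 ++ [st.2 ++ [[day, slot]]], ([] : List (List Int)))
              else st) st)
      (([], []) : List (List (List Int)) × List (List Int))).1.map shrinkA

-- ===== PORT B =====
def EmptySlots_alt (schedule_array : List (List Int)) : List (List (List Int)) :=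
  ((PySem.List.enumerate schedule_array 0).foldl
      (fun (st : List (List (List Int)) × Option (List Int)) dr =>
        (PySem.List.enumerate dr.2 0).foldl
          (fun st sv =>
            if sv.2 = -1 then
              match st.2 with
              | none => (st.1, some [dr.1, sv.1])
              | some _ => st
            else
              match st.2 with
              | some s => (st.1 ++ [[s, [dr.1, sv.1]]], none)
              | none => st) st)
      (([], none) : List (List (List Int)) × Option (List Int))).1

-- ===== PRECONDITION & SPEC =====
-- Pre_ excludes exactly the empty schedule, on which Python A raises IndexError.
def Pre_EmptySlots (schedule_array : List (List Int)) : Prop := schedule_array ≠ []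
instance (schedule_array : List (List Int)) : Decidable (Pre_EmptySlots schedule_array) := by unfold Pre_EmptySlots; infer_instance
def pvWitness_EmptySlots : List (List Int) := [[-1, 2]]

def Spec_EmptySlots (schedule_array : List (List Int)) (out : List (List (List Int))) : Prop := out = EmptySlots_alt schedule_array
instance (schedule_array : List (List Int)) (out : List (List (List Int))) : Decidable (Spec_EmptySlots schedule_array out) := by unfold Spec_EmptySlots; infer_instance

-- ===== CLAIM (what is proved, stated in full; the proofs are below) =====
def Claim_equal_EmptySlots : Prop := ∀ (schedule_array : List (List Int)), Dom_EmptySlots schedule_array → Pre_EmptySlots schedule_array → Spec_EmptySlots schedule_array (EmptySlots schedule_array)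

-- ===== LEMMAS AND PROOFS =====

-- A's per-slot step, over a (slot index, value) pair
def stepA (n day : Int) (st : List (List (List Int)) × List (List Int)) (p : Int × Int) :
    List (List (List Int)) × List (List Int) :=
  if p.2 = -1 then (st.1, st.2 ++ [[day, p.1]])
  else
    if st.2.length > 0 ∨ (st.2.length > 0 ∧ p.1 = n - 1) then
      (st.1 ++ [st.2 ++ [[day, p.1]]], [])
    else st

-- B's per-slot step
def stepB (day : Int) (st : List (List (List Int)) × Option (List Int)) (p : Int × Int) :
    List (List (List Int)) × Option (List Int) :=
  if p.2 = -1 then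
    match st.2 with
    | none => (st.1, some [day, p.1])
    | some _ => st
  else
    match st.2 with
    | some s => (st.1 ++ [[s, [day, p.1]]], none)
    | none => st

-- relation between A's and B's loop states
def RelSt (a : List (List (List Int)) × List (List Int))
    (b : List (List (List Int)) × Option (List Int)) : Prop :=
  b.1 = a.1.map shrinkA ∧ b.2 = a.2.head?

lemma shrinkA_two (x y : List Int) : shrinkA [x, y] = [x, y] := by
  simp [shrinkA]

lemma shrinkA_cons_append (s : List Int) (mid : List (List Int)) (c : List Int) :
    shrinkA (s :: (mid ++ [c])) = [s, c] := by
  induction mid generalizing s with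
  | nil => simpa using shrinkA_two s c
  | cons m ms ih =>
    cases h : ms ++ [c] with
    | nil => simp at h
    | cons z rest =>
      simp only [List.cons_append, shrinkA, h]
      rw [← h, ih]

lemma stepA_stepB (n day : Int) (p : Int × Int) (a : List (List (List Int)) × List (List Int))
    (b : List (List (List Int)) × Option (List Int)) (h : RelSt a b) :
    RelSt (stepA n day a p) (stepB day b p) := by
  obtain ⟨a1, a2⟩ := a
  obtain ⟨b1, ob⟩ := b
  obtain ⟨h1, h2⟩ := h
  simp only at h1 h2
  cases a2 with
  | nil =>
    simp only [List.head?_nil] at h2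
    subst h2
    by_cases hv : p.2 = -1 <;>
      simp [stepA, stepB, hv, RelSt, h1]
  | cons e t =>
    simp only [List.head?_cons] at h2
    subst h2
    by_cases hv : p.2 = -1 <;>
      simp [stepA, stepB, hv, RelSt, h1, shrinkA_cons_append]

lemma foldl_inner (n day : Int) (l : List (Int × Int)) (a b) (h : RelSt a b) :
    RelSt (l.foldl (stepA n day) a) (l.foldl (stepB day) b) := by
  induction l generalizing a b with
  | nil => simpa
  | cons p ps ih => exact ih _ _ (stepA_stepB n day p a b h)

-- outer per-day steps
def dayA (n : Int) (st : List (List (List Int)) × List (List Int)) (dr : Int × List Int) :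
    List (List (List Int)) × List (List Int) :=
  (PySem.List.enumerate dr.2 0).foldl (stepA n dr.1) st

def dayB (st : List (List (List Int)) × Option (List Int)) (dr : Int × List Int) :
    List (List (List Int)) × Option (List Int) :=
  (PySem.List.enumerate dr.2 0).foldl (stepB dr.1) st

lemma foldl_outer (n : Int) (rows : List (Int × List Int)) (a b) (h : RelSt a b) :
    RelSt (rows.foldl (dayA n) a) (rows.foldl dayB b) := by
  induction rows generalizing a b with
  | nil => simpa
  | cons r rs ih => exact ih _ _ (foldl_inner n r.1 _ a b h)

-- A's loops, rewritten as folds over enumerations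
lemma EmptySlots_eq_fold (sa : List (List Int)) :
    EmptySlots sa =
      ((PySem.List.enumerate sa 0).foldl
        (dayA ((PySem.List.pyGetD sa 0 []).length : Int)) ([], [])).1.map shrinkA := by
  unfold EmptySlots dayA stepA
  conv_rhs => rw [PySem.List.enumerate_eq_map_pyRange sa ([] : List Int)]
  simp only [List.foldl_map, PySem.List.len_eq,
    fun (row : List Int) => PySem.List.enumerate_eq_map_pyRange row (0 : Int)]

lemma EmptySlots_alt_eq_fold (sa : List (List Int)) :
    EmptySlots_alt sa = ((PySem.List.enumerate sa 0).foldl dayB ([], none)).1 := by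
  unfold EmptySlots_alt dayB stepB
  rfl

-- ===== VERDICT (by name: the statement is the Claim_ definition above) =====
theorem EmptySlots_spec : Claim_equal_EmptySlots := by
  intro sa _ _
  unfold Spec_EmptySlots
  rw [EmptySlots_eq_fold, EmptySlots_alt_eq_fold]
  have h := foldl_outer ((PySem.List.pyGetD sa 0 []).length : Int)
      (PySem.List.enumerate sa 0) ([], []) ([], none) ⟨rfl, rfl⟩
  exact h.1.symm
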